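-- pv_equiv track=rewrite | github.com/crissymoon/sig-sql | corrected_moon_analyzer.py | extract_neural_features
-- ===== SOURCE A (Python) =====
-- def extract_neural_features(data, user_input):
--     """Extract features for neural network processing"""
--
--     features = {}
--
--     # Data complexity (input layer feature)
--     features['data_complexity'] = int(len(data) / 10) + len([c for c in data if not c.isalnum()])
--
--     # Semantic analysis score
--     semantic_indicators = ['define', 'explain', 'what is', 'meaning', 'description']
--     features['semantic_score'] = sum(10 for indicator in semantic_indicators if indicator in user_input.lower())
--
--     # Context analysis score
--     context_indicators = ['store', 'save', 'analyze', 'process', 'understand']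
--     features['context_score'] = sum(8 for indicator in context_indicators if indicator in user_input.lower())
--
--     # Business classification weights
--     business_terms = ['employee', 'customer', 'revenue', 'salary', 'payroll', 'business', 'company']
--     features['business_score'] = sum(15 for term in business_terms if term in data.lower() or term in user_input.lower())
--
--     # Technical classification weights
--     technical_terms = ['code', 'function', 'algorithm', 'database', 'api', 'system', 'programming']
--     features['technical_score'] = sum(12 for term in technical_terms if term in data.lower() or term in user_input.lower())
--
--     # Personal classification weights
--     personal_terms = ['personal', 'private', 'my', 'purchase', 'expense', 'diary', 'note']
--     features['personal_score'] = sum(10 for term in personal_terms if term in data.lower() or term in user_input.lower())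
--
--     return features
-- ===== SOURCE B (Python) =====
-- _VOCAB = ['define', 'explain', 'what is', 'meaning', 'description',
--           'store', 'save', 'analyze', 'process', 'understand',
--           'employee', 'customer', 'revenue', 'salary', 'payroll', 'business', 'company',
--           'code', 'function', 'algorithm', 'database', 'api', 'system', 'programming',
--           'personal', 'private', 'my', 'purchase', 'expense', 'diary', 'note']
--
-- def _hits(text):
--     """All vocabulary keywords occurring in text, collected by one positional
--     scan over the text: at each start position, record every keyword that
--     begins there.  Replaces the per-keyword substring membership tests."""
--     found = set()
--     for i in range(len(text)):
--         for t in _VOCAB: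
--             if text.startswith(t, i):
--                 found.add(t)
--     return found
--
-- _SPECS = [
--     ('semantic_score', 10, ['define', 'explain', 'what is', 'meaning', 'description'], False),
--     ('context_score', 8, ['store', 'save', 'analyze', 'process', 'understand'], False),
--     ('business_score', 15, ['employee', 'customer', 'revenue', 'salary', 'payroll', 'business', 'company'], True),
--     ('technical_score', 12, ['code', 'function', 'algorithm', 'database', 'api', 'system', 'programming'], True),
--     ('personal_score', 10, ['personal', 'private', 'my', 'purchase', 'expense', 'diary', 'note'], True),
-- ]
--
-- def extract_neural_features(data, user_input):
--     """Extract features for neural network processing."""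
--     ui_hits = _hits(user_input.lower())
--     data_hits = _hits(data.lower())
--     features = {'data_complexity': len(data) // 10 + sum(1 for c in data if not c.isalnum())}
--     for key, weight, terms, both in _SPECS:
--         features[key] = weight * sum(1 for t in terms if t in ui_hits or (both and t in data_hits))
--     return features
-- ===== Notes on version B (the rewrite author's own statement) =====
-- stated objective: alternative
-- what changed: B inverts the search: instead of A's 14 per-term 'term in text' substring-membership tests per category, B makes one positional scan over each lowercased text collecting into a set every vocabulary keyword that starts at each position, and then derives every category score as weight times the number of that category's terms present in the hit set(s).
import Mathlib
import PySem

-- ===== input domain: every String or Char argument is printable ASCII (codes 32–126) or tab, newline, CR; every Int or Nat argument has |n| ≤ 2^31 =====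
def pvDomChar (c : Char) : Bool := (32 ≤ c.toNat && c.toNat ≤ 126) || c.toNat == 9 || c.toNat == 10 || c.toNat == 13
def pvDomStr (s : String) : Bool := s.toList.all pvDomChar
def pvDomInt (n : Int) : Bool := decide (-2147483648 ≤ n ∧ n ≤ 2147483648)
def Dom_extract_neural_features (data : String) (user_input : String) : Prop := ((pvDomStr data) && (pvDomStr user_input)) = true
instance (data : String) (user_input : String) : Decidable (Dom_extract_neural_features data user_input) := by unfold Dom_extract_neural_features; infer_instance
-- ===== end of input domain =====

-- B replaces A's per-term substring-membership tests by one positional scan per text that collects every vocabulary keyword into a hit set, deriving each score from set membership (objective: alternative).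

-- ===== PORT A =====
def extract_neural_features (data : String) (user_input : String) : List (String × Int) :=
  let features : PySem.Dict String Int := PySem.Dict.empty
  -- int(len(data)/10): len ≥ 0, so float truncation = floor division by 10
  let features := features.insert "data_complexity"
    (PySem.Int.floordiv (PySem.Str.len data) 10 +
      ((data.toList.filter (fun c => !(PySem.Chars.isalnum c))).length : Int))
  let features := features.insert "semantic_score"
    ((["define", "explain", "what is", "meaning", "description"] : List String).foldl
      (fun acc ind => if PySem.Str.isIn ind (PySem.Str.lower user_input) then acc + 10 else acc) (0 : Int))
  let features := features.insert "context_score"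
    ((["store", "save", "analyze", "process", "understand"] : List String).foldl
      (fun acc ind => if PySem.Str.isIn ind (PySem.Str.lower user_input) then acc + 8 else acc) (0 : Int))
  let features := features.insert "business_score"
    ((["employee", "customer", "revenue", "salary", "payroll", "business", "company"] : List String).foldl
      (fun acc t => if (PySem.Str.isIn t (PySem.Str.lower data) || PySem.Str.isIn t (PySem.Str.lower user_input)) then acc + 15 else acc) (0 : Int))
  let features := features.insert "technical_score"
    ((["code", "function", "algorithm", "database", "api", "system", "programming"] : List String).foldl
      (fun acc t => if (PySem.Str.isIn t (PySem.Str.lower data) || PySem.Str.isIn t (PySem.Str.lower user_input)) then acc + 12 else acc) (0 : Int))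
  let features := features.insert "personal_score"
    ((["personal", "private", "my", "purchase", "expense", "diary", "note"] : List String).foldl
      (fun acc t => if (PySem.Str.isIn t (PySem.Str.lower data) || PySem.Str.isIn t (PySem.Str.lower user_input)) then acc + 10 else acc) (0 : Int))
  features.items

-- ===== PORT B =====
def pvVocab : List String :=
  ["define", "explain", "what is", "meaning", "description",
   "store", "save", "analyze", "process", "understand",
   "employee", "customer", "revenue", "salary", "payroll", "business", "company",
   "code", "function", "algorithm", "database", "api", "system", "programming",
   "personal", "private", "my", "purchase", "expense", "diary", "note"]

-- _hits: one positional scan; Python's text.startswith(t, i) for 0 ≤ i < len(text) is EXACTLY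
-- 't.toList is a prefix of text.toList.drop i' (ported by hand: PySem.Str has no start-offset startswith).
def pvHits (text : String) : PySem.Set String :=
  (PySem.List.pyRange 0 (PySem.Str.len text) 1).foldl
    (fun found i => pvVocab.foldl
      (fun f t => if PySem.Chars.startswith (text.toList.drop i.toNat) t.toList then PySem.Set.add f t else f)
      found)
    PySem.Set.empty

def pvSpecs : List (String × Int × List String × Bool) :=
  [("semantic_score", 10, ["define", "explain", "what is", "meaning", "description"], false),
   ("context_score", 8, ["store", "save", "analyze", "process", "understand"], false),
   ("business_score", 15, ["employee", "customer", "revenue", "salary", "payroll", "business", "company"], true),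
   ("technical_score", 12, ["code", "function", "algorithm", "database", "api", "system", "programming"], true),
   ("personal_score", 10, ["personal", "private", "my", "purchase", "expense", "diary", "note"], true)]

def extract_neural_features_alt (data : String) (user_input : String) : List (String × Int) :=
  let ui_hits := pvHits (PySem.Str.lower user_input)
  let data_hits := pvHits (PySem.Str.lower data)
  let features : PySem.Dict String Int := (PySem.Dict.empty).insert "data_complexity"
    (PySem.Int.floordiv (PySem.Str.len data) 10 +
      ((data.toList.countP (fun c => !(PySem.Chars.isalnum c)) : Nat) : Int))
  (pvSpecs.foldl
    (fun f s =>
      f.insert s.1 (s.2.1 * ((s.2.2.1.countP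
        (fun t => PySem.Set.contains ui_hits t || (s.2.2.2 && PySem.Set.contains data_hits t)) : Nat) : Int)))
    features).items

-- ===== PRECONDITION & SPEC =====
def Spec_extract_neural_features (data : String) (user_input : String) (out : List (String × Int)) : Prop := out = extract_neural_features_alt data user_input
instance (data : String) (user_input : String) (out : List (String × Int)) : Decidable (Spec_extract_neural_features data user_input out) := by unfold Spec_extract_neural_features; infer_instance

-- ===== CLAIM (what is proved, stated in full; the proofs are below) =====
def Claim_equal_extract_neural_features : Prop := ∀ (data : String) (user_input : String), Dom_extract_neural_features data user_input → Spec_extract_neural_features data user_input (extract_neural_features data user_input)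

-- ===== LEMMAS AND PROOFS =====

-- A's 'sum(w for x in l if p(x))' equals w * (count of p in l).
theorem pv_foldl_if_add {α : Type} (w : Int) (p : α → Bool) (l : List α) (a : Int) :
    l.foldl (fun acc x => if p x then acc + w else acc) a = a + w * (l.countP p : Nat) := by
  induction l generalizing a with
  | nil => simp
  | cons x xs ih =>
      by_cases h : p x = true
      · simp only [List.foldl_cons, List.countP_cons, ih, h, if_pos]
        push_cast; ring
      · simp [List.foldl_cons, ih, h]

-- membership in a conditional-add fold over one position
theorem pv_mem_inner (p : String → Bool) (l : List String) (s : PySem.Set String) (y : String) :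
    y ∈ l.foldl (fun f t => if p t then PySem.Set.add f t else f) s ↔
      y ∈ s ∨ (y ∈ l ∧ p y = true) := by
  induction l generalizing s with
  | nil => simp
  | cons x xs ih =>
      by_cases hx : p x = true
      · simp only [List.foldl_cons, hx, if_pos, ih, PySem.Set.mem_add]
        constructor
        · rintro (⟨h | rfl⟩ | ⟨h1, h2⟩)
          · exact Or.inl h
          · exact Or.inr ⟨List.mem_cons_self .., hx⟩
          · exact Or.inr ⟨List.mem_cons_of_mem _ h1, h2⟩
        · rintro (h | ⟨h1, h2⟩)
          · exact Or.inl (Or.inl h)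
          · rcases List.mem_cons.mp h1 with rfl | h1
            · exact Or.inl (Or.inr rfl)
            · exact Or.inr ⟨h1, h2⟩
      · simp only [List.foldl_cons, hx, if_neg, ih, Bool.not_eq_true]
        constructor
        · rintro (h | ⟨h1, h2⟩)
          · exact Or.inl h
          · exact Or.inr ⟨List.mem_cons_of_mem _ h1, h2⟩
        · rintro (h | ⟨h1, h2⟩)
          · exact Or.inl h
          · rcases List.mem_cons.mp h1 with rfl | h1
            · simp [h2] at hx
            · exact Or.inr ⟨h1, h2⟩

-- membership across the outer positional scan
theorem pv_mem_outer (q : Int → String → Bool) (pos : List Int) (s : PySem.Set String) (y : String) :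
    y ∈ pos.foldl (fun found i => pvVocab.foldl
        (fun f t => if q i t then PySem.Set.add f t else f) found) s ↔
      y ∈ s ∨ (y ∈ pvVocab ∧ ∃ i ∈ pos, q i y = true) := by
  induction pos generalizing s with
  | nil => simp
  | cons i is ih =>
      simp only [List.foldl_cons, ih, pv_mem_inner]
      constructor
      · rintro ((h | ⟨h1, h2⟩) | ⟨h1, j, hj, hq⟩)
        · exact Or.inl h
        · exact Or.inr ⟨h1, i, List.mem_cons_self .., h2⟩
        · exact Or.inr ⟨h1, j, List.mem_cons_of_mem _ hj, hq⟩
      · rintro (h | ⟨h1, j, hj, hq⟩)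
        · exact Or.inl (Or.inl h)
        · rcases List.mem_cons.mp hj with rfl | hj
          · exact Or.inl (Or.inr ⟨h1, hq⟩)
          · exact Or.inr ⟨h1, j, hj, hq⟩

theorem pv_mem_hits (text y : String) :
    y ∈ pvHits text ↔
      y ∈ pvVocab ∧ ∃ i ∈ PySem.List.pyRange 0 (PySem.Str.len text) 1,
        PySem.Chars.startswith (text.toList.drop i.toNat) y.toList = true := by
  unfold pvHits
  rw [pv_mem_outer]
  simp [PySem.Set.empty]

-- The scan's hit set realises the substring test: for a nonempty vocabulary word,
-- membership in pvHits text is exactly Python's 'y in text'.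
theorem pv_contains_hits (text y : String) (hv : y ∈ pvVocab) (hy : y.toList ≠ []) :
    PySem.Set.contains (pvHits text) y = PySem.Str.isIn y text := by
  rw [Bool.eq_iff_iff, PySem.Set.contains_iff, pv_mem_hits, PySem.Str.isIn_iff_infix,
    ← PySem.Chars.isIn_iff_infix, ← PySem.Chars.exists_prefix_drop_iff_isIn]
  constructor
  · rintro ⟨-, i, hi, hq⟩
    exact ⟨i.toNat, (PySem.Chars.startswith_iff _ _).mp hq⟩
  · rintro ⟨j, hj⟩
    refine ⟨hv, (j : Int), ?_, (PySem.Chars.startswith_iff _ _).mpr hj⟩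
    rw [PySem.List.mem_pyRange_one]
    have hjlt : j < text.toList.length := by
      by_contra hge
      rw [List.drop_eq_nil_of_le (by omega)] at hj
      exact hy (List.prefix_nil.mp hj)
    have hlen : text.toList.length = text.length := by simp
    simp [PySem.Str.len_eq]
    omega

set_option maxHeartbeats 2000000 in
theorem extract_neural_features_spec : Claim_equal_extract_neural_features := by
  intro data user_input _
  unfold Spec_extract_neural_features extract_neural_features extract_neural_features_alt pvSpecs
  simp only [pv_foldl_if_add]
  have hco : ∀ (terms : List String), (∀ t ∈ terms, t ∈ pvVocab ∧ t.toList ≠ []) →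
      ∀ (w x : String),
      terms.countP (fun t => PySem.Set.contains (pvHits (PySem.Str.lower w)) t
          || PySem.Set.contains (pvHits (PySem.Str.lower x)) t)
        = terms.countP (fun t => PySem.Str.isIn t (PySem.Str.lower x)
          || PySem.Str.isIn t (PySem.Str.lower w)) := by
    intro terms h w x
    refine List.countP_congr (fun t ht => ?_)
    rw [pv_contains_hits _ _ (h t ht).1 (h t ht).2, pv_contains_hits _ _ (h t ht).1 (h t ht).2,
      Bool.or_comm]
  have hui : ∀ (terms : List String), (∀ t ∈ terms, t ∈ pvVocab ∧ t.toList ≠ []) →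
      ∀ (w : String),
      terms.countP (fun t => PySem.Set.contains (pvHits (PySem.Str.lower w)) t)
        = terms.countP (fun t => PySem.Str.isIn t (PySem.Str.lower w)) := by
    intro terms h w
    refine List.countP_congr (fun t ht => ?_)
    rw [pv_contains_hits _ _ (h t ht).1 (h t ht).2]
  have h1 := hui ["define", "explain", "what is", "meaning", "description"] (by decide) user_input
  have h2 := hui ["store", "save", "analyze", "process", "understand"] (by decide) user_input
  have h3 := hco ["employee", "customer", "revenue", "salary", "payroll", "business", "company"] (by decide) user_input data
  have h4 := hco ["code", "function", "algorithm", "database", "api", "system", "programming"] (by decide) user_input data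
  have h5 := hco ["personal", "private", "my", "purchase", "expense", "diary", "note"] (by decide) user_input data
  simp only [List.foldl_cons, List.foldl_nil, Bool.true_and, Bool.false_and, Bool.or_false,
    h1, h2, h3, h4, h5]
  simp only [List.countP_eq_length_filter, zero_add]
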